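-- pv_equiv track=rewrite | github.com/Zachanardo/Intellicrack | intellicrack/ui/widgets/string_extraction_widget.py | _categorize_string
-- ===== SOURCE A (Python) =====
-- def _categorize_string(string: str) -> str:
--     """Categorize a string based on its content"""
--     string_lower = string.lower()
--
--     # License/Serial patterns
--     if any(
--         pattern in string_lower
--         for pattern in [
--             "license",
--             "serial",
--             "key",
--             "activation",
--             "registration",
--             "trial",
--             "expire",
--             "valid",
--             "unlock",
--         ]
--     ):
--         return "License/Serial"
--
--     # API calls
--     if any(
--         api in string_lower
--         for api in [
--             "kernel32",
--             "ntdll",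
--             "user32",
--             "advapi32",
--             "ws2_32",
--             "createfile",
--             "readfile",
--             "writefile",
--             "virtualprotect",
--             "loadlibrary",
--             "getprocaddress",
--         ]
--     ):
--         return "API Calls"
--
--     # File paths
--     if any(indicator in string for indicator in ["\\", "/", ".dll", ".exe", ".sys"]):
--         return "File Paths"
--
--     # URLs
--     if any(scheme in string_lower for scheme in ["http://", "https://", "ftp://", "www."]):
--         return "URLs"
--
--     # Registry keys
--     if any(reg in string for reg in ["HKEY_", "SOFTWARE\\", "SYSTEM\\", "CurrentControlSet"]):
--         return "Registry Keys"
--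
--     # Error messages
--     if any(
--         err in string_lower
--         for err in [
--             "error",
--             "failed",
--             "cannot",
--             "unable",
--             "invalid",
--             "exception",
--             "fault",
--             "denied",
--         ]
--     ):
--         return "Error Messages"
--
--     # Suspicious strings
--     if any(
--         susp in string_lower
--         for susp in [
--             "debug",
--             "crack",
--             "patch",
--             "bypass",
--             "hack",
--             "ollydbg",
--             "ida",
--             "x64dbg",
--             "processhacker",
--         ]
--     ):
--         return "Suspicious"
--
--     return "Other"
-- ===== SOURCE B (Python) =====
-- # B: flat rank-scored matcher.  Every pattern is one entry (rank, pattern,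
-- # case_sensitive) in a single alphabetically sorted table; one pass takes the
-- # MINIMUM rank over all matching patterns (order-independent, no precedence
-- # branches), and the rank indexes the label list.  'Other' if nothing matched.
-- _LABELS = ["License/Serial", "API Calls", "File Paths", "URLs",
--            "Registry Keys", "Error Messages", "Suspicious"]
--
-- _PATTERNS = [
--     (2, '.dll', True),
--     (2, '.exe', True),
--     (2, '.sys', True),
--     (2, '/', True),
--     (4, 'CurrentControlSet', True),
--     (4, 'HKEY_', True),
--     (4, 'SOFTWARE\\', True),
--     (4, 'SYSTEM\\', True),
--     (2, '\\', True),
--     (0, 'activation', False),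
--     (1, 'advapi32', False),
--     (6, 'bypass', False),
--     (5, 'cannot', False),
--     (6, 'crack', False),
--     (1, 'createfile', False),
--     (6, 'debug', False),
--     (5, 'denied', False),
--     (5, 'error', False),
--     (5, 'exception', False),
--     (0, 'expire', False),
--     (5, 'failed', False),
--     (5, 'fault', False),
--     (3, 'ftp://', False),
--     (1, 'getprocaddress', False),
--     (6, 'hack', False),
--     (3, 'http://', False),
--     (3, 'https://', False),
--     (6, 'ida', False),
--     (5, 'invalid', False),
--     (1, 'kernel32', False),
--     (0, 'key', False),
--     (0, 'license', False),
--     (1, 'loadlibrary', False),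
--     (1, 'ntdll', False),
--     (6, 'ollydbg', False),
--     (6, 'patch', False),
--     (6, 'processhacker', False),
--     (1, 'readfile', False),
--     (0, 'registration', False),
--     (0, 'serial', False),
--     (0, 'trial', False),
--     (5, 'unable', False),
--     (0, 'unlock', False),
--     (1, 'user32', False),
--     (0, 'valid', False),
--     (1, 'virtualprotect', False),
--     (1, 'writefile', False),
--     (1, 'ws2_32', False),
--     (3, 'www.', False),
--     (6, 'x64dbg', False),
-- ]
--
--
-- def _categorize_string(string: str) -> str:
--     low = string.lower()
--     best = None
--     for rank, pattern, case_sensitive in _PATTERNS: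
--         if pattern in (string if case_sensitive else low):
--             best = rank if best is None else min(best, rank)
--     return "Other" if best is None else _LABELS[best]
-- ===== Notes on version B (the rewrite author's own statement) =====
-- stated objective: alternative
-- what changed: Replaced A's seven ordered short-circuit branches by a flat, alphabetically sorted (rank, pattern, case_sensitive) table scanned in one order-independent pass that keeps the minimum matching rank, which then indexes the label list.
import Mathlib
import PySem

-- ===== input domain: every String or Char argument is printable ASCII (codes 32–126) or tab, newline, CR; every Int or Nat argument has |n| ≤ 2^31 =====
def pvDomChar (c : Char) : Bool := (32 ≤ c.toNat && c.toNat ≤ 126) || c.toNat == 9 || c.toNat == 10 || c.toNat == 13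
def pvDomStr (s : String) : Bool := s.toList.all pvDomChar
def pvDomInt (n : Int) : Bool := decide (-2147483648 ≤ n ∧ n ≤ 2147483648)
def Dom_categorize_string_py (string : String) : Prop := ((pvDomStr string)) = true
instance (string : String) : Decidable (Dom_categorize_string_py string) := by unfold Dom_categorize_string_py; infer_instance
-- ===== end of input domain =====

-- B replaces A's seven precedence branches by a flat, alphabetically sorted pattern
-- table scored in one pass by minimum rank (alternative decomposition; same cost).

-- ===== PORT A =====
def categorize_string_py (string : String) : String :=
  let string_lower := PySem.Str.lower string
  if ["license", "serial", "key", "activation", "registration", "trial", "expire",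
      "valid", "unlock"].any (fun pattern => PySem.Str.isIn pattern string_lower) then
    "License/Serial"
  else if ["kernel32", "ntdll", "user32", "advapi32", "ws2_32", "createfile", "readfile",
      "writefile", "virtualprotect", "loadlibrary", "getprocaddress"].any
      (fun api => PySem.Str.isIn api string_lower) then
    "API Calls"
  else if ["\\", "/", ".dll", ".exe", ".sys"].any
      (fun indicator => PySem.Str.isIn indicator string) then
    "File Paths"
  else if ["http://", "https://", "ftp://", "www."].any
      (fun scheme => PySem.Str.isIn scheme string_lower) then
    "URLs"
  else if ["HKEY_", "SOFTWARE\\", "SYSTEM\\", "CurrentControlSet"].any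
      (fun reg => PySem.Str.isIn reg string) then
    "Registry Keys"
  else if ["error", "failed", "cannot", "unable", "invalid", "exception", "fault",
      "denied"].any (fun err => PySem.Str.isIn err string_lower) then
    "Error Messages"
  else if ["debug", "crack", "patch", "bypass", "hack", "ollydbg", "ida", "x64dbg",
      "processhacker"].any (fun susp => PySem.Str.isIn susp string_lower) then
    "Suspicious"
  else
    "Other"

-- ===== PORT B =====
def pvLabels : List String :=
  ["License/Serial", "API Calls", "File Paths", "URLs",
   "Registry Keys", "Error Messages", "Suspicious"]

-- flat table, alphabetically sorted by pattern: (rank, pattern, case_sensitive)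
def pvPatterns : List (Nat × String × Bool) :=
  [(2, ".dll", true), (2, ".exe", true), (2, ".sys", true), (2, "/", true),
   (4, "CurrentControlSet", true), (4, "HKEY_", true), (4, "SOFTWARE\\", true),
   (4, "SYSTEM\\", true), (2, "\\", true), (0, "activation", false),
   (1, "advapi32", false), (6, "bypass", false), (5, "cannot", false),
   (6, "crack", false), (1, "createfile", false), (6, "debug", false),
   (5, "denied", false), (5, "error", false), (5, "exception", false),
   (0, "expire", false), (5, "failed", false), (5, "fault", false),
   (3, "ftp://", false), (1, "getprocaddress", false), (6, "hack", false),
   (3, "http://", false), (3, "https://", false), (6, "ida", false),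
   (5, "invalid", false), (1, "kernel32", false), (0, "key", false),
   (0, "license", false), (1, "loadlibrary", false), (1, "ntdll", false),
   (6, "ollydbg", false), (6, "patch", false), (6, "processhacker", false),
   (1, "readfile", false), (0, "registration", false), (0, "serial", false),
   (0, "trial", false), (5, "unable", false), (0, "unlock", false),
   (1, "user32", false), (0, "valid", false), (1, "virtualprotect", false),
   (1, "writefile", false), (1, "ws2_32", false), (3, "www.", false),
   (6, "x64dbg", false)]

-- 'best = rank if best is None else min(best, rank)'
def pvMerge (acc : Option Nat) (r : Nat) : Option Nat :=
  match acc with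
  | none => some r
  | some b => some (min b r)

-- the loop body: update best if the pattern matches its target
def pvStep (string low : String) (acc : Option Nat) : Nat × String × Bool → Option Nat
  | (r, p, cs) => if PySem.Str.isIn p (if cs then string else low) then pvMerge acc r else acc

def categorize_string_py_alt (string : String) : String :=
  let low := PySem.Str.lower string
  match pvPatterns.foldl (pvStep string low) none with
  | none => "Other"
  | some r => (PySem.List.pyGet? pvLabels (Int.ofNat r)).getD "Other"

-- ===== PRECONDITION & SPEC =====
def Spec_categorize_string_py (string : String) (out : String) : Prop := out = categorize_string_py_alt string
instance (string : String) (out : String) : Decidable (Spec_categorize_string_py string out) := by unfold Spec_categorize_string_py; infer_instance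

-- ===== CLAIM (what is proved, stated in full; the proofs are below) =====
def Claim_equal_categorize_string_py : Prop := ∀ (string : String), Dom_categorize_string_py string → Spec_categorize_string_py string (categorize_string_py string)

-- ===== LEMMAS AND PROOFS =====

-- one group of A, as flat entries with a common rank and case flag
def pvGroup (r : Nat) (cs : Bool) : List String → List (Nat × String × Bool)
  | [] => []
  | p :: ps => (r, p, cs) :: pvGroup r cs ps

-- A's seven groups, concatenated in precedence order (a permutation of pvPatterns)
def pvGrouped : List (Nat × String × Bool) :=
  pvGroup 0 false ["license", "serial", "key", "activation", "registration", "trial",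
                   "expire", "valid", "unlock"] ++
  pvGroup 1 false ["kernel32", "ntdll", "user32", "advapi32", "ws2_32", "createfile",
                   "readfile", "writefile", "virtualprotect", "loadlibrary",
                   "getprocaddress"] ++
  pvGroup 2 true ["\\", "/", ".dll", ".exe", ".sys"] ++
  pvGroup 3 false ["http://", "https://", "ftp://", "www."] ++
  pvGroup 4 true ["HKEY_", "SOFTWARE\\", "SYSTEM\\", "CurrentControlSet"] ++
  pvGroup 5 false ["error", "failed", "cannot", "unable", "invalid", "exception",
                   "fault", "denied"] ++
  pvGroup 6 false ["debug", "crack", "patch", "bypass", "hack", "ollydbg", "ida",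
                   "x64dbg", "processhacker"]

lemma pvMerge_comm (a : Option Nat) (r s : Nat) :
    pvMerge (pvMerge a r) s = pvMerge (pvMerge a s) r := by
  cases a <;> simp [pvMerge, min_assoc, min_comm r s]

lemma pvMerge_idem (a : Option Nat) (r : Nat) :
    pvMerge (pvMerge a r) r = pvMerge a r := by
  cases a <;> simp [pvMerge]

lemma pvStep_comm (s l : String) (x y : Nat × String × Bool) (a : Option Nat) :
    pvStep s l (pvStep s l a x) y = pvStep s l (pvStep s l a y) x := by
  obtain ⟨rx, px, csx⟩ := x
  obtain ⟨ry, py, csy⟩ := y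
  simp only [pvStep]
  split_ifs <;> simp [pvMerge_comm]

set_option maxHeartbeats 1600000 in
lemma pvFoldl_perm (s l : String) :
    pvPatterns.foldl (pvStep s l) none = pvGrouped.foldl (pvStep s l) none := by
  refine List.Perm.foldl_eq' ?_ ?_ none
  · decide
  · intro x _ y _ z; exact pvStep_comm s l x y z

lemma pvFoldl_group (s l : String) (r : Nat) (cs : Bool) (ps : List String)
    (rest : List (Nat × String × Bool)) (acc : Option Nat) :
    List.foldl (pvStep s l) acc (pvGroup r cs ps ++ rest)
      = List.foldl (pvStep s l)
          (if ps.any (fun p => PySem.Str.isIn p (if cs then s else l))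
           then pvMerge acc r else acc) rest := by
  induction ps generalizing acc with
  | nil => simp [pvGroup]
  | cons p ps ih =>
    have hstep : ∀ a : Option Nat, pvStep s l a (r, p, cs)
        = if PySem.Str.isIn p (if cs then s else l) then pvMerge a r else a := fun _ => rfl
    rw [show pvGroup r cs (p :: ps) = (r, p, cs) :: pvGroup r cs ps from rfl,
        List.cons_append, List.foldl_cons, hstep, List.any_cons]
    by_cases h : PySem.Str.isIn p (if cs then s else l) = true
    · rw [if_pos h, ih, h]
      by_cases h2 : ps.any (fun p => PySem.Str.isIn p (if cs then s else l)) = true <;>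
        simp [pvMerge_idem]
    · rw [if_neg h, ih]
      simp only [Bool.not_eq_true] at h
      rw [h]
      simp

lemma pvFoldl_group_last (s l : String) (r : Nat) (cs : Bool) (ps : List String)
    (acc : Option Nat) :
    List.foldl (pvStep s l) acc (pvGroup r cs ps)
      = (if ps.any (fun p => PySem.Str.isIn p (if cs then s else l))
         then pvMerge acc r else acc) := by
  rw [← List.append_nil (pvGroup r cs ps), pvFoldl_group, List.foldl_nil]

-- ===== VERDICT (by name: the statement is the Claim_ definition above) =====
set_option maxHeartbeats 1600000 in
theorem categorize_string_py_spec : Claim_equal_categorize_string_py := by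
  intro string _
  unfold Spec_categorize_string_py categorize_string_py categorize_string_py_alt
  simp only [pvFoldl_perm]
  unfold pvGrouped
  simp only [List.append_assoc]
  rw [pvFoldl_group]
  try simp only [Bool.false_eq_true, if_false]
  by_cases c0 : (["license", "serial", "key", "activation", "registration", "trial", "expire", "valid", "unlock"].any fun p => PySem.Str.isIn p (PySem.Str.lower string)) = true
  · rw [if_pos c0, if_pos c0]
    simp [pvFoldl_group_last, pvMerge]
    rfl
  · rw [if_neg c0, if_neg c0]
    rw [pvFoldl_group]
    try simp only [Bool.false_eq_true, if_false]
    by_cases c1 : (["kernel32", "ntdll", "user32", "advapi32", "ws2_32", "createfile", "readfile", "writefile", "virtualprotect", "loadlibrary", "getprocaddress"].any fun p => PySem.Str.isIn p (PySem.Str.lower string)) = true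
    · rw [if_pos c1, if_pos c1]
      simp [pvFoldl_group_last, pvMerge]
      rfl
    · rw [if_neg c1, if_neg c1]
      rw [pvFoldl_group]
      try simp only [if_true]
      by_cases c2 : (["\\", "/", ".dll", ".exe", ".sys"].any fun p => PySem.Str.isIn p string) = true
      · rw [if_pos c2, if_pos c2]
        simp [pvFoldl_group_last, pvMerge]
        rfl
      · rw [if_neg c2, if_neg c2]
        rw [pvFoldl_group]
        try simp only [Bool.false_eq_true, if_false]
        by_cases c3 : (["http://", "https://", "ftp://", "www."].any fun p => PySem.Str.isIn p (PySem.Str.lower string)) = true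
        · rw [if_pos c3, if_pos c3]
          simp [pvFoldl_group_last, pvMerge]
          rfl
        · rw [if_neg c3, if_neg c3]
          rw [pvFoldl_group]
          try simp only [if_true]
          by_cases c4 : (["HKEY_", "SOFTWARE\\", "SYSTEM\\", "CurrentControlSet"].any fun p => PySem.Str.isIn p string) = true
          · rw [if_pos c4, if_pos c4]
            simp [pvFoldl_group_last, pvMerge]
            rfl
          · rw [if_neg c4, if_neg c4]
            rw [pvFoldl_group]
            try simp only [Bool.false_eq_true, if_false]
            by_cases c5 : (["error", "failed", "cannot", "unable", "invalid", "exception", "fault", "denied"].any fun p => PySem.Str.isIn p (PySem.Str.lower string)) = true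
            · rw [if_pos c5, if_pos c5]
              simp [pvFoldl_group_last, pvMerge]
              rfl
            · rw [if_neg c5, if_neg c5]
              rw [pvFoldl_group_last]
              try simp only [Bool.false_eq_true, if_false]
              by_cases c6 : (["debug", "crack", "patch", "bypass", "hack", "ollydbg", "ida", "x64dbg", "processhacker"].any fun p => PySem.Str.isIn p (PySem.Str.lower string)) = true
              · rw [if_pos c6, if_pos c6]
                rfl
              · rw [if_neg c6, if_neg c6]
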